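-- pv_equiv track=rewrite | github.com/rpasta42/7z-fs | 7z-fs.py | parse_7z_list_names
-- ===== SOURCE A (Python) =====
-- def parse_7z_list_names(out):
--    lines = out.split('\n')
--
--    names_started = False
--
--    fnames = []
--
--    for line in lines:
--       if '----' in line:
--          if not names_started:
--             names_started = True
--             continue
--          else:
--             break
--       if names_started:
--          words = line.split(' ')
--          if len(words) > 0:
--             fnames.append(words[-1])
--       pass
--
--    return fnames
-- ===== SOURCE B (Python) =====
-- def parse_7z_list_names(out):
--    # Two-phase iterator scan instead of a single stateful pass:
--    # phase 1 consumes everything up to and including the first '----' line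
--    # (for-else returns [] if there is none); phase 2 collects names until
--    # the next '----' line or end of input.
--    lines = iter(out.split('\n'))
--    for line in lines:
--       if '----' in line:
--          break
--    else:
--       return []
--    fnames = []
--    for line in lines:
--       if '----' in line:
--          break
--       fnames.append(line.split(' ')[-1])
--    return fnames
-- ===== Notes on version B (the rewrite author's own statement) =====
-- stated objective: simpler
-- what changed: Replaces the single pass with a names_started flag by a two-phase shared-iterator scan: a first loop (with for-else) drops everything through the first '----' line, a second loop collects split(' ')[-1] until the next '----' line.
import Mathlib
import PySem

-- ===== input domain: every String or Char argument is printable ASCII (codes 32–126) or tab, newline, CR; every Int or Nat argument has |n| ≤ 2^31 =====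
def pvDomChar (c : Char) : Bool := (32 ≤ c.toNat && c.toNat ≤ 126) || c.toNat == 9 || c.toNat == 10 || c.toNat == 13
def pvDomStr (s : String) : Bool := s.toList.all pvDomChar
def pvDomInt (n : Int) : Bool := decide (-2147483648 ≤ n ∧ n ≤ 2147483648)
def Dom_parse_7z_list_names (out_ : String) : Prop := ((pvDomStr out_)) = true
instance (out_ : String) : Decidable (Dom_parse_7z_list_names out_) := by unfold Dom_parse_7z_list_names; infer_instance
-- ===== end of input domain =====

-- B replaces A's single stateful pass (names_started flag) by a two-phase iterator scan
-- (drop through the first '----' line, then collect until the next one); objective: simpler.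


-- ===== PORT A =====
-- the for-loop of A: state = (names_started, fnames); '----' lines flip the flag or break
def pvLoopA : List (List Char) → Bool → List (List Char) → List (List Char)
  | [], _, fnames => fnames
  | line :: rest, names_started, fnames =>
    if PySem.Chars.isIn ['-','-','-','-'] line then
      if !names_started then pvLoopA rest true fnames
      else fnames                                          -- break
    else if names_started then
      let words := PySem.Chars.splitOn line [' ']
      if words.length > 0 then
        pvLoopA rest names_started (fnames ++ [PySem.List.pyGetD words (-1) []])
      else pvLoopA rest names_started fnames
    else pvLoopA rest names_started fnames

def parse_7z_list_names (out_ : String) : List String :=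
  (pvLoopA (PySem.Chars.splitOn out_.toList ['\n']) false []).map String.ofList

-- ===== PORT B =====
-- B's first loop: consume lines up to and including the first '----' line;
-- none = the for-else path (no separator at all)
def pvDropPast : List (List Char) → Option (List (List Char))
  | [] => none
  | line :: rest =>
    if PySem.Chars.isIn ['-','-','-','-'] line then some rest else pvDropPast rest

-- B's second loop: collect line.split(' ')[-1] until a '----' line or end of input
def pvCollect : List (List Char) → List (List Char)
  | [] => []
  | line :: rest =>
    if PySem.Chars.isIn ['-','-','-','-'] line then []
    else PySem.List.pyGetD (PySem.Chars.splitOn line [' ']) (-1) [] :: pvCollect rest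

def parse_7z_list_names_alt (out_ : String) : List String :=
  match pvDropPast (PySem.Chars.splitOn out_.toList ['\n']) with
  | none => []
  | some rest => (pvCollect rest).map String.ofList

-- ===== PRECONDITION & SPEC =====
def Spec_parse_7z_list_names (out_ : String) (out : List String) : Prop := out = parse_7z_list_names_alt out_
instance (out_ : String) (out : List String) : Decidable (Spec_parse_7z_list_names out_ out) := by unfold Spec_parse_7z_list_names; infer_instance

-- ===== CLAIM (what is proved, stated in full; the proofs are below) =====
def Claim_equal_parse_7z_list_names : Prop := ∀ (out_ : String), Dom_parse_7z_list_names out_ → Spec_parse_7z_list_names out_ (parse_7z_list_names out_)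

-- ===== LEMMAS AND PROOFS =====

-- line.split(' ') is never empty, so A's 'len(words) > 0' guard always holds
theorem pvSplitOn_go_ne_nil (n : Nat) : ∀ (l cur : List Char) (acc : List (List Char)),
    PySem.Chars.splitOn.go [' '] n l cur acc ≠ [] := by
  induction n with
  | zero => intro l cur acc; simp [PySem.Chars.splitOn.go]
  | succ n ih => intro l cur acc; cases l <;> simp [PySem.Chars.splitOn.go] <;> split <;> simp_all

theorem pvSplitOn_ne_nil (l : List Char) : PySem.Chars.splitOn l [' '] ≠ [] := by
  simpa [PySem.Chars.splitOn] using pvSplitOn_go_ne_nil (l.length + 1) l [] []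

-- the started phase of A's loop is B's collecting loop (prefixed by the accumulator)
theorem pvLoopA_true (ls : List (List Char)) : ∀ (acc : List (List Char)),
    pvLoopA ls true acc = acc ++ pvCollect ls := by
  induction ls with
  | nil => intro acc; simp [pvLoopA, pvCollect]
  | cons l ls ih =>
    intro acc
    by_cases h : PySem.Chars.isIn ['-','-','-','-'] l
    · simp [pvLoopA, pvCollect, h]
    · simp [pvLoopA, pvCollect, h, List.length_pos_iff.mpr (pvSplitOn_ne_nil l), ih]

-- the not-yet-started phase of A's loop is B's dropping loop followed by collection
theorem pvLoopA_false (ls : List (List Char)) :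
    pvLoopA ls false [] = match pvDropPast ls with
      | none => []
      | some rest => pvCollect rest := by
  induction ls with
  | nil => simp [pvLoopA, pvDropPast]
  | cons l ls ih =>
    by_cases h : PySem.Chars.isIn ['-','-','-','-'] l
    · simp [pvLoopA, pvDropPast, h, pvLoopA_true]
    · simpa [pvLoopA, pvDropPast, h] using ih

-- ===== VERDICT (by name: the statement is the Claim_ definition above) =====
theorem parse_7z_list_names_spec : Claim_equal_parse_7z_list_names := by
  intro out_ _
  unfold Spec_parse_7z_list_names parse_7z_list_names parse_7z_list_names_alt
  rw [pvLoopA_false]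
  cases pvDropPast (PySem.Chars.splitOn out_.toList ['\n']) <;> simp
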